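-- pv_equiv track=rewrite | github.com/shreyas12official/test | 2129-number-of-pairs-of-interchangeable-rectangles/number-of-pairs-of-interchangeable-rectangles.py | interchangeableRectangles
-- ===== SOURCE A (Python) =====
-- from typing import List
--
-- from math import gcd
--
-- def interchangeableRectangles(rectangles: List[List[int]]) -> int:
--     a={}
--     b=0
--     for c,d in rectangles:
--         e=gcd(c,d)
--         s=(c//e,d//e)
--         if s in a:
--             b+=a[s]
--             a[s]+=1
--         else:
--             a[s]=1
--     return b
-- ===== SOURCE B (Python) =====
-- from math import gcd
--
-- def interchangeableRectangles(rectangles):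
--     # brute-force pair counting over reduced ratios, no hash map:
--     # build the key list, then repeatedly pop the front key and count
--     # its duplicates among the keys still in the list.
--     ks = []
--     for c, d in rectangles:
--         g = gcd(c, d)
--         ks.append((c // g, d // g))
--     total = 0
--     while ks:
--         k = ks.pop(0)
--         total += ks.count(k)
--     return total
-- ===== Notes on version B (the rewrite author's own statement) =====
-- stated objective: alternative
-- what changed: B drops the hash map entirely: it builds the list of reduced ratio keys and counts equal pairs by brute force, popping each front key and counting its duplicates in the remaining list (each element paired with later equals), whereas A maintains a dict of running group counts and accumulates pairs with earlier equals incrementally.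
import Mathlib
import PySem

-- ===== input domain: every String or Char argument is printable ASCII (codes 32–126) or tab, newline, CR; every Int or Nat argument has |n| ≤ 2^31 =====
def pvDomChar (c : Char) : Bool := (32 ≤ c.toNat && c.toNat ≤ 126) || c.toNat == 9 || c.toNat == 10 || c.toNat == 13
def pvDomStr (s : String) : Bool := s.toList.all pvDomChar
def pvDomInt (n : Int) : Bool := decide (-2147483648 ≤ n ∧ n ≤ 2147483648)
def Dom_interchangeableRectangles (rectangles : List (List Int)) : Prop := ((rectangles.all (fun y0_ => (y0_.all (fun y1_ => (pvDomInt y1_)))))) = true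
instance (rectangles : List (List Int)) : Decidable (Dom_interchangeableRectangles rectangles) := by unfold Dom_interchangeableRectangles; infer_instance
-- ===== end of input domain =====

-- B replaces A's dict of running group counts by brute-force pair counting over the list of reduced ratio keys (each key paired with later equal keys); return value only, both use local state.


-- ===== PORT A =====
-- math.gcd(c, d) is nonnegative = Int.gcd; // is PySem.Int.floordiv
def pvKey (c d : Int) : Int × Int :=
  let e : Int := Int.gcd c d
  (PySem.Int.floordiv c e, PySem.Int.floordiv d e)

-- one iteration of A's loop on state (a, b); rows not of shape [c, d] are outside Pre_ (unpack raises)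
def pvStepA (st : PySem.Dict (Int × Int) Int × Int) (row : List Int) :
    PySem.Dict (Int × Int) Int × Int :=
  match row with
  | [c, d] =>
    let s := pvKey c d
    if st.1.contains s then
      (st.1.insert s (st.1.getD s 0 + 1), st.2 + st.1.getD s 0)
    else
      (st.1.insert s 1, st.2)
  | _ => st

def interchangeableRectangles (rectangles : List (List Int)) : Int :=
  (rectangles.foldl pvStepA (PySem.Dict.empty, 0)).2

-- ===== PORT B =====
-- B's first loop: ks.append((c//g, d//g)); malformed rows are outside Pre_ (unpack raises)
def pvBuildKeys (acc : List (Int × Int)) (row : List Int) : List (Int × Int) :=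
  match row with
  | [c, d] => acc ++ [pvKey c d]
  | _ => acc

-- B's while loop: k = ks.pop(0); total += ks.count(k)
def pvPopLoop : List (Int × Int) → Int → Int
  | [], total => total
  | k :: t, total => pvPopLoop t (total + (t.count k : Int))

def interchangeableRectangles_alt (rectangles : List (List Int)) : Int :=
  pvPopLoop (rectangles.foldl pvBuildKeys []) 0

-- ===== PRECONDITION & SPEC =====
-- Pre_ excludes exactly the inputs where A raises: a row not of length 2 (unpack ValueError)
-- or the row [0, 0] (gcd = 0, so c//e raises ZeroDivisionError). B raises identically there.
def Pre_interchangeableRectangles (rectangles : List (List Int)) : Prop :=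
  ∀ row ∈ rectangles, row.length = 2 ∧ row ≠ [0, 0]
instance (rectangles : List (List Int)) : Decidable (Pre_interchangeableRectangles rectangles) := by
  unfold Pre_interchangeableRectangles; infer_instance

def pvWitness_interchangeableRectangles : List (List Int) := [[2, 4], [1, 2], [3, 5]]

def Spec_interchangeableRectangles (rectangles : List (List Int)) (out : Int) : Prop := out = interchangeableRectangles_alt rectangles
instance (rectangles : List (List Int)) (out : Int) : Decidable (Spec_interchangeableRectangles rectangles out) := by unfold Spec_interchangeableRectangles; infer_instance

-- ===== CLAIM (what is proved, stated in full; the proofs are below) =====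
def Claim_equal_interchangeableRectangles : Prop := ∀ (rectangles : List (List Int)), Dom_interchangeableRectangles rectangles → Pre_interchangeableRectangles rectangles → Spec_interchangeableRectangles rectangles (interchangeableRectangles rectangles)

-- ===== LEMMAS AND PROOFS =====

-- pairs of each element with LATER equal elements (what B computes)
def pvPc : List (Int × Int) → Int
  | [] => 0
  | k :: t => (t.count k : Int) + pvPc t

-- pairs of each element of l with EARLIER equal elements, prefix P prepended (what A accumulates)
def pvPcWith (P : List (Int × Int)) : List (Int × Int) → Int
  | [] => 0
  | k :: t => (P.count k : Int) + pvPcWith (P ++ [k]) t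

-- cross pairs between P and l
def pvCross (P l : List (Int × Int)) : Int := (l.map (fun k => (P.count k : Int))).sum

lemma pvPopLoop_eq (l : List (Int × Int)) : ∀ b, pvPopLoop l b = b + pvPc l := by
  induction l with
  | nil => intro b; simp [pvPopLoop, pvPc]
  | cons k t ih => intro b; simp [pvPopLoop, pvPc, ih]; ring

lemma pvCount_singleton_cast (x k : Int × Int) :
    (List.count x [k] : Int) = if x = k then 1 else 0 := by
  by_cases h : x = k
  · subst h; simp
  · rw [if_neg h]
    have h0 : List.count x [k] = 0 :=
      List.count_eq_zero.mpr (fun hm => h (List.mem_singleton.mp hm))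
    simp [h0]

lemma pvCross_append (P : List (Int × Int)) (k : Int × Int) (t : List (Int × Int)) :
    pvCross (P ++ [k]) t = pvCross P t + (t.count k : Int) := by
  induction t with
  | nil => simp [pvCross]
  | cons x t ih =>
    simp only [pvCross, List.map_cons, List.sum_cons] at ih ⊢
    rw [ih, List.count_append]
    push_cast
    rw [pvCount_singleton_cast, List.count_cons]
    push_cast
    by_cases h : x = k
    · subst h; simp; ring
    · have h2 : (x == k) = false := by simp [h]
      simp [h, h2]; ring

lemma pvPcWith_eq (l : List (Int × Int)) : ∀ P, pvPcWith P l = pvCross P l + pvPc l := by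
  induction l with
  | nil => intro P; simp [pvPcWith, pvPc, pvCross]
  | cons k t ih =>
    intro P
    simp only [pvPcWith, pvPc, pvCross, List.map_cons, List.sum_cons]
    rw [ih (P ++ [k]), pvCross_append]
    unfold pvCross
    ring

lemma pvCross_nil (l : List (Int × Int)) : pvCross [] l = 0 := by
  simp [pvCross]

-- A's fold, tracked against the list P of keys already processed
lemma pv_loopA (rows : List (List Int)) :
    ∀ (a : PySem.Dict (Int × Int) Int) (b : Int) (P : List (Int × Int)),
    (∀ r ∈ rows, r.length = 2) →
    (∀ s, a.getD s 0 = (P.count s : Int)) →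
    (∀ s, a.contains s = decide (s ∈ P)) →
    (rows.foldl pvStepA (a, b)).2 = b + pvPcWith P (rows.foldl pvBuildKeys []) := by
  induction rows with
  | nil => intro a b P _ _ _; simp [pvPcWith]
  | cons r t ih =>
    intro a b P hl hget hmem
    match r, hl r List.mem_cons_self with
    | [c, d], _ =>
      have hkeys : t.foldl pvBuildKeys [pvKey c d] = pvKey c d :: t.foldl pvBuildKeys [] := by
        have hgen : ∀ (u : List (List Int)) (acc : List (Int × Int)),
            u.foldl pvBuildKeys acc = acc ++ u.foldl pvBuildKeys [] := by
          intro u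
          induction u with
          | nil => intro acc; simp
          | cons r' u' ihu =>
            intro acc
            simp only [List.foldl_cons]
            rw [ihu (pvBuildKeys acc r'), ihu (pvBuildKeys [] r')]
            cases r' with
            | nil => simp [pvBuildKeys]
            | cons x xs =>
              cases xs with
              | nil => simp [pvBuildKeys]
              | cons y ys =>
                cases ys with
                | nil => simp [pvBuildKeys]
                | cons z zs => simp [pvBuildKeys]
        rw [hgen t [pvKey c d]]; rfl
      set s := pvKey c d with hs
      have hb : pvBuildKeys [] [c, d] = [s] := rfl
      have hgetmem : ∀ s' : Int × Int, s' ≠ s →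
          ∀ (v : Int), ((a.insert s v).getD s' 0 = ((P ++ [s]).count s' : Int)
            ∧ (a.insert s v).contains s' = decide (s' ∈ P ++ [s])) := by
        intro s' hne v
        constructor
        · rw [PySem.Dict.getD_insert, if_neg hne, hget s', List.count_append]
          push_cast
          rw [pvCount_singleton_cast, if_neg hne]
          ring
        · rw [PySem.Dict.contains_insert, hmem s']
          have : (s' == s) = false := by simp [hne]
          simp [this, List.mem_append, hne]
      by_cases hc : a.contains s = true
      · have hsA : pvStepA (a, b) [c, d] = (a.insert s (a.getD s 0 + 1), b + a.getD s 0) := by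
          simp only [pvStepA, ← hs, hc, if_true]
        have hmemP : s ∈ P := by
          have := hmem s; rw [hc] at this; exact of_decide_eq_true this.symm
        have hstep := ih (a.insert s (a.getD s 0 + 1)) (b + a.getD s 0) (P ++ [s])
          (fun r hr => hl r (List.mem_cons_of_mem _ hr))
          (by
            intro s'
            by_cases h : s' = s
            · subst h
              rw [PySem.Dict.getD_insert_self, hget s, List.count_append]
              push_cast
              rw [pvCount_singleton_cast, if_pos rfl]
            · exact ((hgetmem s' h _).1))
          (by
            intro s'
            by_cases h : s' = s
            · subst h
              rw [PySem.Dict.contains_insert_self]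
              simp [List.mem_append]
            · exact ((hgetmem s' h _).2))
        rw [List.foldl_cons, List.foldl_cons, hsA, hstep, hb, hkeys]
        simp only [pvPcWith]
        rw [hget s]
        ring
      · have hc' : a.contains s = false := by
          cases h : a.contains s with
          | true => exact absurd h hc
          | false => rfl
        have hsA : pvStepA (a, b) [c, d] = (a.insert s 1, b) := by
          simp only [pvStepA, ← hs, hc', Bool.false_eq_true, if_false]
        have hnmemP : s ∉ P := by
          have := hmem s; rw [hc'] at this
          exact of_decide_eq_false this.symm
        have hcount0 : P.count s = 0 := List.count_eq_zero.mpr hnmemP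
        have hstep := ih (a.insert s 1) b (P ++ [s])
          (fun r hr => hl r (List.mem_cons_of_mem _ hr))
          (by
            intro s'
            by_cases h : s' = s
            · subst h
              rw [PySem.Dict.getD_insert_self, List.count_append]
              push_cast
              rw [pvCount_singleton_cast, if_pos rfl, hcount0]
              simp
            · exact ((hgetmem s' h _).1))
          (by
            intro s'
            by_cases h : s' = s
            · subst h
              rw [PySem.Dict.contains_insert_self]
              simp [List.mem_append]
            · exact ((hgetmem s' h _).2))
        rw [List.foldl_cons, List.foldl_cons, hsA, hstep, hb, hkeys]
        simp only [pvPcWith]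
        rw [hcount0]
        simp

-- ===== VERDICT (by name: the statement is the Claim_ definition above) =====
theorem interchangeableRectangles_spec : Claim_equal_interchangeableRectangles := by
  intro rectangles _ hpre
  unfold Spec_interchangeableRectangles interchangeableRectangles interchangeableRectangles_alt
  rw [pv_loopA rectangles PySem.Dict.empty 0 []
        (fun r hr => (hpre r hr).1)
        (fun s => by simp [PySem.Dict.getD_empty])
        (fun s => by simp [PySem.Dict.contains_empty]),
      pvPcWith_eq, pvCross_nil, pvPopLoop_eq]
  ring
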